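-- pv_equiv track=rewrite | github.com/LucasCAzevedo/maxmin-select-algorithm | main.py | maxmin_select
-- ===== SOURCE A (Python) =====
-- def maxmin_select(arr, low, high):
--     """
--     Algoritmo de seleção simultânea do maior e menor elemento usando divisão e conquista.
--
--     Args:
--         arr: Lista de números para encontrar o máximo e mínimo
--         low: Índice inicial do subvetor
--         high: Índice final do subvetor
--
--     Returns:
--         tuple: (menor_elemento, maior_elemento)
--     """
--     # Caso base 1: apenas um elemento
--     if low == high:
--         return arr[low], arr[low]
--
--     # Caso base 2: dois elementos
--     if high == low + 1:
--         if arr[low] <= arr[high]: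
--             return arr[low], arr[high]
--         else:
--             return arr[high], arr[low]
--
--     # Divisão: encontra o ponto médio
--     mid = (low + high) // 2
--
--     # Conquista: resolve recursivamente as metades esquerda e direita
--     min_left, max_left = maxmin_select(arr, low, mid)
--     min_right, max_right = maxmin_select(arr, mid + 1, high)
--
--     # Combinação: encontra o mínimo e máximo globais
--     global_min = min(min_left, min_right)
--     global_max = max(max_left, max_right)
--
--     return global_min, global_max
-- ===== SOURCE B (Python) =====
-- def maxmin_select(arr, low, high):
--     """Single linear pass: keep running min and max over arr[low..high]."""
--     mn = mx = arr[low]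
--     for i in range(low + 1, high + 1):
--         v = arr[i]
--         if v < mn:
--             mn = v
--         if v > mx:
--             mx = v
--     return mn, mx
-- ===== Notes on version B (the rewrite author's own statement) =====
-- stated objective: simpler
-- what changed: Replaces the recursive divide-and-conquer (midpoint split plus min/max combination step) with a single flat loop over the subarray keeping a running min and max.
import Mathlib
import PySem

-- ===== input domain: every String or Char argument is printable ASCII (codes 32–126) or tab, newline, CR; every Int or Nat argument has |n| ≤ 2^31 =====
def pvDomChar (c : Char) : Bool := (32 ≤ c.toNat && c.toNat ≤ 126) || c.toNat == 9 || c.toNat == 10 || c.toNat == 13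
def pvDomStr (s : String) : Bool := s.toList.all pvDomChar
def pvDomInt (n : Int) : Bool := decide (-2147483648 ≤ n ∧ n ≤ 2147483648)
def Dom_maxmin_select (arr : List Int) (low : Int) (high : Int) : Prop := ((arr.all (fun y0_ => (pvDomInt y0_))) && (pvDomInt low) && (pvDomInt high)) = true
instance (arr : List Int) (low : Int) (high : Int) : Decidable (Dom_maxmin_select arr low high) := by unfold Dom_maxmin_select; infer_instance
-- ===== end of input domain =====

-- B replaces A's recursive divide-and-conquer min/max with a single linear pass (simpler, same O(n) cost).


-- ===== PORT A =====
-- fuel guard only makes the recursion total; on every input admitted by Pre_ the fuel suffices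
-- (index guard .getD 0 is never hit under Pre_: Python would raise IndexError there)
def maxminFuel (arr : List Int) : Nat → Int → Int → Int × Int
  | 0, _, _ => (0, 0)
  | fuel+1, low, high =>
    if low = high then
      let v := (PySem.List.pyGet? arr low).getD 0
      (v, v)
    else if high = low + 1 then
      let a := (PySem.List.pyGet? arr low).getD 0
      let b := (PySem.List.pyGet? arr high).getD 0
      if a ≤ b then (a, b) else (b, a)
    else
      let mid := PySem.Int.floordiv (low + high) 2
      let l := maxminFuel arr fuel low mid
      let r := maxminFuel arr fuel (mid + 1) high
      (min l.1 r.1, max l.2 r.2)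

def maxmin_select (arr : List Int) (low : Int) (high : Int) : Int × Int :=
  maxminFuel arr ((high - low).toNat + 1) low high

-- ===== PORT B =====
def maxmin_select_alt (arr : List Int) (low : Int) (high : Int) : Int × Int :=
  let v0 := (PySem.List.pyGet? arr low).getD 0
  (PySem.List.pyRange (low + 1) (high + 1) 1).foldl
    (fun p i =>
      let v := (PySem.List.pyGet? arr i).getD 0
      (if v < p.1 then v else p.1, if v > p.2 then v else p.2))
    (v0, v0)

-- ===== PRECONDITION & SPEC =====
-- Pre_ excludes exactly the inputs where Python A raises (IndexError on an index outside
-- [-len, len)) or diverges (low > high): the claim covers every input on which A returns.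
def Pre_maxmin_select (arr : List Int) (low : Int) (high : Int) : Prop :=
  low ≤ high ∧ -(arr.length : Int) ≤ low ∧ high < (arr.length : Int)
instance (arr : List Int) (low : Int) (high : Int) : Decidable (Pre_maxmin_select arr low high) := by
  unfold Pre_maxmin_select; infer_instance

def pvWitness_maxmin_select : List Int × Int × Int := ([3, 1, 2], 0, 2)

def Spec_maxmin_select (arr : List Int) (low : Int) (high : Int) (out : Int × Int) : Prop := out = maxmin_select_alt arr low high
instance (arr : List Int) (low : Int) (high : Int) (out : Int × Int) : Decidable (Spec_maxmin_select arr low high out) := by unfold Spec_maxmin_select; infer_instance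

-- ===== CLAIM (what is proved, stated in full; the proofs are below) =====
def Claim_equal_maxmin_select : Prop := ∀ (arr : List Int) (low : Int) (high : Int), Dom_maxmin_select arr low high → Pre_maxmin_select arr low high → Spec_maxmin_select arr low high (maxmin_select arr low high)

-- ===== LEMMAS AND PROOFS =====

-- reference value: min and max of a nonempty list, as running folds
def mmRef : List Int → Int × Int
  | [] => (0, 0)
  | v :: t => (t.foldl min v, t.foldl max v)

theorem foldl_min_init (t : List Int) : ∀ a w, t.foldl min (min a w) = min a (t.foldl min w) := by
  induction t with
  | nil => intro a w; rfl
  | cons x t ih => intro a w; simp only [List.foldl_cons, min_assoc]; exact ih a (min w x)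

theorem foldl_max_init (t : List Int) : ∀ a w, t.foldl max (max a w) = max a (t.foldl max w) := by
  induction t with
  | nil => intro a w; rfl
  | cons x t ih => intro a w; simp only [List.foldl_cons, max_assoc]; exact ih a (max w x)

theorem mmRef_append (l1 l2 : List Int) (h1 : l1 ≠ []) (h2 : l2 ≠ []) :
    mmRef (l1 ++ l2) = (min (mmRef l1).1 (mmRef l2).1, max (mmRef l1).2 (mmRef l2).2) := by
  match l1, l2 with
  | v :: t1, w :: t2 =>
    simp only [mmRef, List.cons_append, List.foldl_append, List.foldl_cons]
    rw [foldl_min_init, foldl_max_init]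

-- the pairwise step of B computes componentwise min/max
theorem pair_step (a b v : Int) :
    ((if v < a then v else a : Int), (if v > b then v else b : Int)) = (min a v, max b v) := by
  rw [min_def, max_def, Prod.mk.injEq]
  constructor <;> split_ifs <;> omega

-- B's loop over indices equals the componentwise min/max folds over the mapped values
theorem foldl_pair (arr : List Int) (l : List Int) : ∀ a b,
    l.foldl (fun p i =>
      let v := (PySem.List.pyGet? arr i).getD 0
      (if v < p.1 then v else p.1, if v > p.2 then v else p.2)) (a, b)
    = ((l.map (fun i => (PySem.List.pyGet? arr i).getD 0)).foldl min a,
       (l.map (fun i => (PySem.List.pyGet? arr i).getD 0)).foldl max b) := by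
  induction l with
  | nil => intro a b; rfl
  | cons x t ih =>
    intro a b
    simp only [List.foldl_cons, List.map_cons]
    rw [pair_step a b]
    exact ih (min a ((PySem.List.pyGet? arr x).getD 0)) (max b ((PySem.List.pyGet? arr x).getD 0))

-- B equals the reference folds over the value segment
theorem alt_eq_mmRef (arr : List Int) (low high : Int) (h : low ≤ high) :
    maxmin_select_alt arr low high =
      mmRef ((PySem.List.pyRange low (high + 1) 1).map (fun i => (PySem.List.pyGet? arr i).getD 0)) := by
  have hc : low < high + 1 := by omega
  rw [PySem.List.pyRange_one_cons hc]
  simp only [maxmin_select_alt, mmRef, List.map_cons]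
  exact foldl_pair arr _ _ _

-- A equals the same reference folds, by induction on the fuel
theorem fuel_eq_mmRef (arr : List Int) : ∀ (fuel : Nat) (low high : Int), low ≤ high →
    (high - low).toNat < fuel →
    maxminFuel arr fuel low high =
      mmRef ((PySem.List.pyRange low (high + 1) 1).map (fun i => (PySem.List.pyGet? arr i).getD 0)) := by
  intro fuel
  induction fuel with
  | zero => intro low high _ hf; omega
  | succ fuel ih =>
    intro low high hle hf
    by_cases h1 : low = high
    · subst h1
      rw [PySem.List.pyRange_one_singleton]
      simp [maxminFuel, mmRef]
    · by_cases h2 : high = low + 1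
      · subst h2
        have : low + 1 + 1 = low + 2 := by ring
        rw [this, PySem.List.pyRange_one_cons (by omega), PySem.List.pyRange_one_cons (by omega),
            PySem.List.pyRange_one_eq_nil (by omega)]
        simp only [maxminFuel, if_neg h1, List.map_cons, List.map_nil, mmRef,
          List.foldl_cons, List.foldl_nil]
        rw [min_def, max_def]
        split_ifs <;> simp_all; omega
      · have hmid : PySem.Int.floordiv (low + high) 2 = Int.fdiv (low + high) 2 := rfl
        set mid := PySem.Int.floordiv (low + high) 2 with hm
        have hfd : mid = (low + high).fdiv 2 := hmid
        have hfe : (low + high).fdiv 2 = (low + high) / 2 := Int.fdiv_eq_ediv_of_nonneg _ (by omega)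
        have hb1 : low + 1 ≤ mid := by rw [hfd, hfe]; omega
        have hb2 : mid ≤ high - 1 := by rw [hfd, hfe]; omega
        have e1 := ih low mid (by omega) (by omega)
        have e2 := ih (mid + 1) high (by omega) (by omega)
        have hsplit := PySem.List.pyRange_one_append low (mid + 1) (high + 1) (by omega) (by omega)
        rw [show maxminFuel arr (fuel + 1) low high =
              (min (maxminFuel arr fuel low mid).1 (maxminFuel arr fuel (mid + 1) high).1,
               max (maxminFuel arr fuel low mid).2 (maxminFuel arr fuel (mid + 1) high).2) by
              simp only [maxminFuel, if_neg h1, if_neg h2, ← hm]]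
        rw [e1, e2, hsplit, List.map_append,
            mmRef_append _ _ (by rw [PySem.List.pyRange_one_cons (by omega)]; simp)
                             (by rw [PySem.List.pyRange_one_cons (by omega)]; simp)]

-- ===== VERDICT (by name: the statement is the Claim_ definition above) =====
theorem maxmin_select_spec : Claim_equal_maxmin_select := by
  intro arr low high _ hpre
  obtain ⟨hle, _, _⟩ := hpre
  unfold Spec_maxmin_select maxmin_select
  rw [fuel_eq_mmRef arr _ low high hle (by omega), alt_eq_mmRef arr low high hle]
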